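-- pv_equiv track=rewrite | github.com/saartanel/iti0102-2019 | aoc/day04.py | part2
-- ===== SOURCE A (Python) =====
-- def part2(a):
--     """
--     Abit bigger data.
--     :param a:
--     :return:
--     """
--     b = []
--     for i in a:
--         c = []
--         for j in str(i):
--             c.append(str(i).count(j))
--         if 2 in c:
--             b.append(i)
--     return b
-- ===== SOURCE B (Python) =====
-- def _scan(s, cur, n):
--     """Run-length scan over a sorted character list: True iff some maximal
--     run (the run of cur already seen n times, or a later one) has length 2."""
--     if not s:
--         return n == 2
--     if s[0] == cur:
--         return _scan(s[1:], cur, n + 1)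
--     return n == 2 or _scan(s[1:], s[0], 1)
--
--
-- def part2(a):
--     """Keep numbers whose string form has some character occurring exactly twice.
--
--     Sort-then-scan: sort the characters of str(i), then walk the sorted list
--     grouping equal adjacent characters; keep i if any run has length exactly 2
--     (in a sorted list a run's length is the character's total count).
--     """
--     res = []
--     for i in a:
--         s = sorted(str(i))
--         if s and _scan(s[1:], s[0], 1):
--             res.append(i)
--     return res
-- ===== Notes on version B (the rewrite author's own statement) =====
-- stated objective: alternative
-- what changed: Per number, B sorts the characters of str(i) and does one run-length scan of the sorted list (keep i if some run has length exactly 2), instead of A's rescan of str(i) with .count for every character; correct because in a sorted list a run's length equals that character's total count.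
import Mathlib
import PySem

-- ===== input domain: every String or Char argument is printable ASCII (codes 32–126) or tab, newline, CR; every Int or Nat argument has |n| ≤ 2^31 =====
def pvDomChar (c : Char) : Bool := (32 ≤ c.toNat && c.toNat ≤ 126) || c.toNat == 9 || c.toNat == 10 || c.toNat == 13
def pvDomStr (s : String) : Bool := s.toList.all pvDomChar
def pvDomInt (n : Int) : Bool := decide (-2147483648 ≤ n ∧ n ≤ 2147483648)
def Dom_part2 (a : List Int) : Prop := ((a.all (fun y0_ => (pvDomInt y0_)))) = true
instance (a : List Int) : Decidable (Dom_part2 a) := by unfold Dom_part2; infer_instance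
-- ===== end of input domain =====

-- B sorts each number's characters and keeps the number iff one run-length scan of the
-- sorted list finds a run of length exactly 2; A rescans str(i) with .count per character.

-- ===== PORT A =====
-- for i in a: c = [str(i).count(j) for j in str(i)]; if 2 in c: b.append(i)
def part2 (a : List Int) : List Int :=
  a.foldl (fun b i =>
    let s := PySem.Int.toChars i
    let c := s.foldl (fun c j => c ++ [((PySem.Chars.count s [j] : Nat) : Int)]) []
    if c.contains (2 : Int) then b ++ [i] else b) []

-- ===== PORT B =====
-- def _scan(s, cur, n): if not s: return n == 2
--   if s[0] == cur: return _scan(s[1:], cur, n+1)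
--   return n == 2 or _scan(s[1:], s[0], 1)
def scanRun : List Char → Char → Int → Bool
  | [], _, n => n == 2
  | x :: xs, cur, n => if x == cur then scanRun xs cur (n + 1) else (n == 2 || scanRun xs x 1)

-- for i in a: s = sorted(str(i)); if s and _scan(s[1:], s[0], 1): res.append(i)
def part2_alt (a : List Int) : List Int :=
  a.foldl (fun res i =>
    let s := PySem.List.sorted (PySem.Int.toChars i) (fun c => c) false
    let keep := match s with
      | [] => false
      | c :: t => scanRun t c 1
    if keep then res ++ [i] else res) []

-- ===== PRECONDITION & SPEC =====
def Spec_part2 (a : List Int) (out : List Int) : Prop := out = part2_alt a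
instance (a : List Int) (out : List Int) : Decidable (Spec_part2 a out) := by unfold Spec_part2; infer_instance

-- ===== CLAIM (what is proved, stated in full; the proofs are below) =====
def Claim_equal_part2 : Prop := ∀ (a : List Int), Dom_part2 a → Spec_part2 a (part2 a)

-- ===== LEMMAS AND PROOFS =====

-- str.count with a single-character needle is List.count
theorem chars_count_go_singleton (c : Char) (s : List Char) (fuel acc : Nat)
    (h : s.length ≤ fuel) :
    PySem.Chars.count.go [c] fuel s acc = acc + s.count c := by
  induction s generalizing fuel acc with
  | nil => cases fuel <;> simp [PySem.Chars.count.go]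
  | cons hd t ih =>
    cases fuel with
    | zero => simp at h
    | succ f =>
      simp only [List.length_cons, Nat.succ_le_succ_iff] at h
      by_cases hc : c = hd
      · subst hc
        simp [PySem.Chars.count.go, List.isPrefixOf, ih _ _ h]
        omega
      · simp [PySem.Chars.count.go, List.isPrefixOf, hc, ih _ _ h, Ne.symm hc]

theorem chars_count_singleton (s : List Char) (c : Char) :
    PySem.Chars.count s [c] = s.count c := by
  simp [PySem.Chars.count, chars_count_go_singleton c s s.length 0 le_rfl]

-- A's per-number condition: some character of s occurs exactly twice in s
theorem a_cond_iff (s : List Char) :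
    (s.foldl (fun c j => c ++ [((PySem.Chars.count s [j] : Nat) : Int)]) []).contains (2 : Int)
      = true ↔ ∃ j ∈ s, s.count j = 2 := by
  rw [PySem.List.foldl_append_singleton_eq_map]
  simp [List.contains_eq_mem, List.mem_map, chars_count_singleton]
  constructor
  · rintro ⟨j, hj, h⟩; exact ⟨j, hj, by exact_mod_cast h⟩
  · rintro ⟨j, hj, h⟩; exact ⟨j, hj, by exact_mod_cast h⟩

-- The run scan on a sorted tail: with n copies of cur already seen and every element
-- of t at least cur, the scan succeeds iff cur's total multiplicity is 2 or some
-- later character's multiplicity in t is 2.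
theorem scanRun_spec (t : List Char) (cur : Char) (n : Nat)
    (hs : t.Pairwise (· ≤ ·)) (hc : ∀ x ∈ t, cur ≤ x) :
    scanRun t cur (n : Int) = true ↔
      (n + t.count cur = 2 ∨ ∃ c ∈ t, c ≠ cur ∧ t.count c = 2) := by
  induction t generalizing cur n with
  | nil => simp [scanRun]; omega
  | cons x xs ih =>
    rcases List.pairwise_cons.mp hs with ⟨hx, hxs⟩
    by_cases hxc : x = cur
    · subst hxc
      have h1 : scanRun (x :: xs) x (n : Int) = scanRun xs x ((n + 1 : Nat) : Int) := by
        simp [scanRun]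
      rw [h1, ih x (n + 1) hxs hx]
      constructor
      · rintro (h | ⟨c, hcmem, hne, hcnt⟩)
        · left; simp; omega
        · right
          exact ⟨c, List.mem_cons_of_mem _ hcmem,
            hne, by simp [Ne.symm hne, hcnt]⟩
      · rintro (h | ⟨c, hcmem, hne, hcnt⟩)
        · left; simp at h; omega
        · right
          rcases List.mem_cons.mp hcmem with rfl | hcmem
          · exact absurd rfl hne
          · refine ⟨c, hcmem, hne, ?_⟩
            simpa [List.count_cons, Ne.symm hne] using hcnt
    · have hlt : cur < x := lt_of_le_of_ne (hc x (List.mem_cons_self)) (fun h => hxc h.symm)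
      have hnotin : cur ∉ x :: xs := fun h => by
        rcases List.mem_cons.mp h with rfl | h
        · exact hxc rfl
        · exact absurd (hx cur h) (not_le.mpr hlt)
      have hcnt0 : (x :: xs).count cur = 0 := List.count_eq_zero.mpr hnotin
      have h1 : scanRun (x :: xs) cur (n : Int) = ((n : Int) == 2 || scanRun xs x 1) := by
        simp [scanRun, hxc]
      rw [h1, Bool.or_eq_true, beq_iff_eq]
      have h2 := ih x 1 hxs hx
      norm_num only at h2
      rw [h2]
      constructor
      · rintro (h | h | ⟨c, hcmem, hne, hcnt⟩)
        · left; rw [hcnt0]; exact_mod_cast h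
        · right
          refine ⟨x, List.mem_cons_self, fun he => hxc he, ?_⟩
          simp; omega
        · right
          refine ⟨c, List.mem_cons_of_mem _ hcmem, fun he => ?_, ?_⟩
          · subst he; exact absurd (hx c hcmem) (not_le.mpr hlt)
          · simpa [List.count_cons, Ne.symm hne] using hcnt
      · rintro (h | ⟨c, hcmem, hne, hcnt⟩)
        · left; rw [hcnt0] at h; exact_mod_cast (by omega : (n : Int) = 2)
        · rcases List.mem_cons.mp hcmem with rfl | hcmem
          · right; left; simp at hcnt; omega
          · by_cases hcx : c = x
            · subst hcx; right; left; simp at hcnt; omega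
            · right; right
              refine ⟨c, hcmem, hcx, ?_⟩
              simpa [List.count_cons, Ne.symm hcx] using hcnt

-- B's per-number condition equals A's
theorem b_cond_iff (s : List Char) :
    (match PySem.List.sorted s (fun c => c) false with
      | [] => false
      | c :: t => scanRun t c 1) = true ↔ ∃ j ∈ s, s.count j = 2 := by
  have hperm : (PySem.List.sorted s (fun c => c) false).Perm s := PySem.List.sorted_perm s _ _
  have hsorted : (PySem.List.sorted s (fun c => c) false).Pairwise (· ≤ ·) := by
    simpa using PySem.List.sorted_pairwise s (fun c => c)
  cases hss : PySem.List.sorted s (fun c => c) false with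
  | nil =>
    have : s = [] := by
      have := hperm; rw [hss] at this; exact (List.Perm.nil_eq this).symm
    simp [this]
  | cons c t =>
    rw [hss] at hperm hsorted
    rcases List.pairwise_cons.mp hsorted with ⟨hct, ht⟩
    have h := scanRun_spec t c 1 ht hct
    norm_num at h
    rw [h]
    have hcount : ∀ j : Char, s.count j = (c :: t).count j := fun j => (hperm.count_eq j).symm
    have hmem : ∀ j : Char, j ∈ s ↔ j ∈ c :: t := fun j => (hperm.mem_iff).symm
    constructor
    · rintro (h1 | ⟨d, hd, hne, h2⟩)
      · exact ⟨c, (hmem c).mpr List.mem_cons_self, by rw [hcount]; simp; omega⟩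
      · refine ⟨d, (hmem d).mpr (List.mem_cons_of_mem _ hd), ?_⟩
        rw [hcount]; simp [Ne.symm hne, h2]
    · rintro ⟨j, hj, hcnt⟩
      rw [hcount j] at hcnt
      by_cases hjc : j = c
      · subst hjc; left; simp at hcnt; omega
      · right
        rcases List.mem_cons.mp ((hmem j).mp hj) with rfl | hjt
        · exact absurd rfl hjc
        · exact ⟨j, hjt, hjc, by simpa [List.count_cons, Ne.symm hjc] using hcnt⟩

theorem part2_eq_alt (a : List Int) : part2 a = part2_alt a := by
  unfold part2 part2_alt
  induction a using List.reverseRecOn with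
  | nil => rfl
  | append_singleton xs i ih =>
    simp only [List.foldl_append, List.foldl_cons, List.foldl_nil, ih]
    congr 1
    have hA := a_cond_iff (PySem.Int.toChars i)
    have hB := b_cond_iff (PySem.Int.toChars i)
    by_cases h : ∃ j ∈ PySem.Int.toChars i, (PySem.Int.toChars i).count j = 2
    · simp only [hA.mpr h, hB.mpr h]
    · have hA' := (Bool.eq_false_iff.mpr (fun he => h (hA.mp he)))
      have hB' := (Bool.eq_false_iff.mpr (fun he => h (hB.mp he)))
      simp only [hA', hB']

-- ===== VERDICT (by name: the statement is the Claim_ definition above) =====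
theorem part2_spec : Claim_equal_part2 := fun a _ => part2_eq_alt a
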